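-- pv_equiv track=rewrite | github.com/antoniotinoco/A-Maze-ing | mazegen/display.py | _solution_steps
-- ===== SOURCE A (Python) =====
-- def _solution_steps(entry: tuple[int, int], path: str) -> list[tuple[tuple[int, int], tuple[int, int]]]:
--     """Turn a solution string into a list of movement segments.
--
--     Example:
--         If the entry is ``(0, 0)`` and the path is ``"ES"``, the result is a
--         list of segments showing movement from ``(0, 0)`` to ``(1, 0)`` and
--         then from ``(1, 0)`` to ``(1, 1)``.
--
--     Args:
--         entry: Starting maze coordinate.
--         path: Solution path using letters ``N``, ``S``, ``E``, ``W``.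
--
--     Returns:
--         A list of ``((x1, y1), (x2, y2))`` movement pairs.
--     """
--     x, y = entry
--     steps: list[tuple[tuple[int, int], tuple[int, int]]] = []
--
--     for move in path:
--         nx, ny = x, y
--         if move == "N":
--             ny -= 1
--         elif move == "S":
--             ny += 1
--         elif move == "E":
--             nx += 1
--         elif move == "W":
--             nx -= 1
--         steps.append(((x, y), (nx, ny)))
--         x, y = nx, ny
--
--     return steps
-- ===== SOURCE B (Python) =====
-- def _net(path):
--     """Net displacement of a path, computed by letter counts."""
--     return (path.count("E") - path.count("W"),
--             path.count("S") - path.count("N"))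
--
--
-- def _solution_steps(entry, path):
--     # Divide and conquer: split the path in half, recurse on each half;
--     # the midpoint is entry plus the left half's net displacement (letter counts).
--     if not path:
--         return []
--     if len(path) == 1:
--         dx, dy = _net(path)
--         return [(entry, (entry[0] + dx, entry[1] + dy))]
--     mid = len(path) // 2
--     left, right = path[:mid], path[mid:]
--     dx, dy = _net(left)
--     midpoint = (entry[0] + dx, entry[1] + dy)
--     return _solution_steps(entry, left) + _solution_steps(midpoint, right)
-- ===== Notes on version B (the rewrite author's own statement) =====
-- stated objective: alternative
-- what changed: B is a divide-and-conquer: it splits the path in half, computes the midpoint position from the left half's net displacement via letter counts (count('E')-count('W'), count('S')-count('N')), and concatenates the recursively built segment lists, instead of A's single left-to-right stateful scan.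
import Mathlib
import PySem

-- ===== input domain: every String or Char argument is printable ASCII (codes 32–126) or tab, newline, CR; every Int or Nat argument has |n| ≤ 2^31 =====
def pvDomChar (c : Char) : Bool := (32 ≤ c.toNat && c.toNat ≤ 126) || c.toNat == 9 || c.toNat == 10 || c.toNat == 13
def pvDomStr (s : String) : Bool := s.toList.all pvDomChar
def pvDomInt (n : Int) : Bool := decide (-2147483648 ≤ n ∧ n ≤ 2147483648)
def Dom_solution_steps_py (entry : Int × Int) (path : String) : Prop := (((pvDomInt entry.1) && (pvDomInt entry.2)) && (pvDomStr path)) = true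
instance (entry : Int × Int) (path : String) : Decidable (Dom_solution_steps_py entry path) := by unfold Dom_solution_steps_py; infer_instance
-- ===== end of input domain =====

-- B rebuilds the segment list by divide and conquer (split the path in half, midpoint from
-- letter counts) instead of A's left-to-right stateful scan; objective: alternative algorithm.

-- ===== PORT A =====
-- loop over the path characters carrying (x, y); branches in A's order N, S, E, W
def pvStepsA (x y : Int) : List Char → List ((Int × Int) × (Int × Int))
  | [] => []
  | c :: cs =>
    let p : Int × Int :=
      if c = 'N' then (x, y - 1)
      else if c = 'S' then (x, y + 1)
      else if c = 'E' then (x + 1, y)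
      else if c = 'W' then (x - 1, y)
      else (x, y)
    ((x, y), p) :: pvStepsA p.1 p.2 cs

def solution_steps_py (entry : Int × Int) (path : String) : List ((Int × Int) × (Int × Int)) :=
  pvStepsA entry.1 entry.2 path.toList

-- ===== PORT B =====
-- _net(path): net displacement via letter counts (str.count on chars = List.count)
def pvNet (l : List Char) : Int × Int :=
  ((l.count 'E' : Int) - l.count 'W', (l.count 'S' : Int) - l.count 'N')

-- divide and conquer from Source B; path[:mid] / path[mid:] with 0 ≤ mid ≤ len are exactly take/drop
def pvStepsB (entry : Int × Int) : List Char → List ((Int × Int) × (Int × Int))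
  | [] => []
  | [c] =>
    let n := pvNet [c]
    [(entry, (entry.1 + n.1, entry.2 + n.2))]
  | c1 :: c2 :: rest =>
    let l := c1 :: c2 :: rest
    let mid := l.length / 2
    let left := l.take mid
    let right := l.drop mid
    let n := pvNet left
    pvStepsB entry left ++ pvStepsB (entry.1 + n.1, entry.2 + n.2) right
  termination_by l => l.length
  decreasing_by
    · simp only [List.length_take, List.length_cons]; omega
    · simp only [List.length_drop, List.length_cons]; omega

def solution_steps_py_alt (entry : Int × Int) (path : String) : List ((Int × Int) × (Int × Int)) :=
  pvStepsB entry path.toList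

-- ===== PRECONDITION & SPEC =====
def Spec_solution_steps_py (entry : Int × Int) (path : String) (out : List ((Int × Int) × (Int × Int))) : Prop := out = solution_steps_py_alt entry path
instance (entry : Int × Int) (path : String) (out : List ((Int × Int) × (Int × Int))) : Decidable (Spec_solution_steps_py entry path out) := by unfold Spec_solution_steps_py; infer_instance

-- ===== CLAIM (what is proved, stated in full; the proofs are below) =====
def Claim_equal_solution_steps_py : Prop := ∀ (entry : Int × Int) (path : String), Dom_solution_steps_py entry path → Spec_solution_steps_py entry path (solution_steps_py entry path)

-- ===== LEMMAS AND PROOFS =====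

-- A's one-character step lands on entry + net displacement of that character
theorem pvStep_eq_net (x y : Int) (c : Char) :
    (if c = 'N' then ((x, y - 1) : Int × Int)
     else if c = 'S' then (x, y + 1)
     else if c = 'E' then (x + 1, y)
     else if c = 'W' then (x - 1, y)
     else (x, y)) = (x + (pvNet [c]).1, y + (pvNet [c]).2) := by
  simp only [pvNet]
  split_ifs with h1 h2 h3 h4 <;> subst_eqs <;> simp_all [List.count_nil] <;> try ring

theorem pvNet_append (l1 l2 : List Char) :
    pvNet (l1 ++ l2) = ((pvNet l1).1 + (pvNet l2).1, (pvNet l1).2 + (pvNet l2).2) := by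
  simp [pvNet, List.count_append]; constructor <;> ring

theorem pvStepsA_append (l1 l2 : List Char) : ∀ (x y : Int),
    pvStepsA x y (l1 ++ l2) =
      pvStepsA x y l1 ++ pvStepsA (x + (pvNet l1).1) (y + (pvNet l1).2) l2 := by
  induction l1 with
  | nil => intro x y; simp [pvStepsA, pvNet]
  | cons c cs ih =>
    intro x y
    have hnet : pvNet (c :: cs) = ((pvNet [c]).1 + (pvNet cs).1, (pvNet [c]).2 + (pvNet cs).2) :=
      pvNet_append [c] cs
    simp only [List.cons_append, pvStepsA, pvStep_eq_net, hnet]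
    rw [ih]
    simp [add_assoc]

-- B computes A's result
theorem pvStepsB_eq (entry : Int × Int) (l : List Char) :
    pvStepsB entry l = pvStepsA entry.1 entry.2 l := by
  fun_induction pvStepsB entry l with
  | case1 e => simp [pvStepsA]
  | case2 e c =>
    simp only [pvStepsA]
    rw [pvStep_eq_net]
  | case3 e c1 c2 rest l mid left right n ih1 ih2 =>
    rw [ih1, ih2]
    have hsplit : left ++ right = c1 :: c2 :: rest := List.take_append_drop _ _
    calc pvStepsA e.1 e.2 left ++ pvStepsA (e.1 + n.1, e.2 + n.2).1 (e.1 + n.1, e.2 + n.2).2 right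
        = pvStepsA e.1 e.2 (left ++ right) := by rw [pvStepsA_append]
      _ = pvStepsA e.1 e.2 (c1 :: c2 :: rest) := by rw [hsplit]

-- ===== VERDICT (by name: the statement is the Claim_ definition above) =====
theorem solution_steps_py_spec : Claim_equal_solution_steps_py := by
  intro entry path _
  unfold Spec_solution_steps_py solution_steps_py solution_steps_py_alt
  exact (pvStepsB_eq entry path.toList).symm
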